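-- pv_equiv track=rewrite | github.com/yhshu/HippoRAG | src/rerank/__init__.py | retrieved_to_candidate_facts
-- ===== SOURCE A (Python) =====
-- def retrieved_to_candidate_facts(candidate_items, candidate_indices, k=30):
--     # bind candidate_items and candidate_indices
--     candidate_indices_and_items = list(zip(candidate_indices, candidate_items))
--     # remove triples with duplicate subjects and objects
--     candidate_dict = {}
--     for item in candidate_indices_and_items:
--         if (item[1][0], item[1][2]) not in candidate_dict:
--             candidate_dict[(item[1][0], item[1][2])] = item
--     candidate_indices_and_items = list(candidate_dict.values())
--     # order candidate items by subject
--     candidate_indices_and_items = sorted(candidate_indices_and_items, key=lambda x: x[1][0])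
--     # unpack candidate_indices_and_items
--     sorted_candidate_indices, sorted_candidate_items = zip(*candidate_indices_and_items)
--     return sorted_candidate_items[:k], sorted_candidate_indices[:k]
-- ===== SOURCE B (Python) =====
-- def retrieved_to_candidate_facts(candidate_items, candidate_indices, k=30):
--     # bucket pairs by subject (one pass); dedup objects inside each bucket;
--     # then emit buckets in sorted-subject order
--     groups = {}
--     for pair in zip(candidate_indices, candidate_items):
--         subj = pair[1][0]
--         bucket, seen_objects = groups.setdefault(subj, ([], set()))
--         obj = pair[1][2]
--         if obj not in seen_objects:
--             seen_objects.add(obj)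
--             bucket.append(pair)
--     merged = []
--     for subj in sorted(groups):
--         merged.extend(groups[subj][0])
--     sorted_candidate_items = [p[1] for p in merged]
--     sorted_candidate_indices = [p[0] for p in merged]
--     return sorted_candidate_items[:k], sorted_candidate_indices[:k]
-- ===== Notes on version B (the rewrite author's own statement) =====
-- stated objective: alternative
-- what changed: B replaces A's global dedup-then-sort of (index,item) pairs by a grouping algorithm: one pass buckets the pairs into a dict keyed by subject (each bucket deduplicating its own objects with a per-bucket seen-set), then only the distinct subjects are sorted and the buckets are concatenated in that key order.
import Mathlib
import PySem

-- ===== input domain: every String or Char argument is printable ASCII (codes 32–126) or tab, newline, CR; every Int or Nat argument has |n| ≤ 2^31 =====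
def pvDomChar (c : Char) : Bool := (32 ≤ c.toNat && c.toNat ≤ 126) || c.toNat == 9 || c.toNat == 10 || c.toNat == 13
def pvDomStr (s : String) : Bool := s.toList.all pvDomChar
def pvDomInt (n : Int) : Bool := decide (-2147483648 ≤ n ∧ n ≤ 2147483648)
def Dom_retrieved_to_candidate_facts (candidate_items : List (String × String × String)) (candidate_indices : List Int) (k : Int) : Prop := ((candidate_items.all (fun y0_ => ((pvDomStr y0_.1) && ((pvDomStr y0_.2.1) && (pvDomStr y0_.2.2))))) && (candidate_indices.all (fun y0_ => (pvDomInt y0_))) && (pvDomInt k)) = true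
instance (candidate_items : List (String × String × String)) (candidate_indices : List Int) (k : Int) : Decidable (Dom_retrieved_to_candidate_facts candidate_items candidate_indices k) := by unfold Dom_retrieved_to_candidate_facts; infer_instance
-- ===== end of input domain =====

-- B replaces A's global dedup-then-sort by bucketing the pairs into per-subject
-- groups (each with its own seen-object set) and concatenating the buckets in
-- sorted-key order (alternative algorithm, same result).

-- ===== PORT A =====
def retrieved_to_candidate_facts (candidate_items : List (String × String × String)) (candidate_indices : List Int) (k : Int) : (List (String × String × String)) × List Int :=
  let candidate_indices_and_items := List.zip candidate_indices candidate_items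
  let candidate_dict := candidate_indices_and_items.foldl
    (fun d item =>
      if d.contains (item.2.1, item.2.2.2) = false then d.insert (item.2.1, item.2.2.2) item else d)
    (PySem.Dict.empty : PySem.Dict (String × String) (Int × (String × String × String)))
  let vals := candidate_dict.values
  let sortedVals := PySem.List.sorted vals (fun x => x.2.1)
  let sorted_candidate_indices := sortedVals.map (fun x => x.1)
  let sorted_candidate_items := sortedVals.map (fun x => x.2)
  (PySem.List.slice sorted_candidate_items none (some k),
   PySem.List.slice sorted_candidate_indices none (some k))

-- ===== PORT B =====
def retrieved_to_candidate_facts_alt (candidate_items : List (String × String × String)) (candidate_indices : List Int) (k : Int) : (List (String × String × String)) × List Int :=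
  -- bucket pairs by subject; each bucket carries its list and its seen-object set
  let groups := (List.zip candidate_indices candidate_items).foldl
    (fun d pair =>
      let g := d.getD pair.2.1 ([], (PySem.Set.empty : PySem.Set String))
      if g.2.contains pair.2.2.2 then d
      else d.insert pair.2.1 (g.1 ++ [pair], g.2.add pair.2.2.2))
    (PySem.Dict.empty : PySem.Dict String (List (Int × (String × String × String)) × PySem.Set String))
  -- emit the buckets in sorted-subject order
  let merged := (PySem.List.sorted groups.keys (fun s => s)).foldl
    (fun acc subj => acc ++ (groups.getD subj ([], PySem.Set.empty)).1) []
  (PySem.List.slice (merged.map (fun p => p.2)) none (some k),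
   PySem.List.slice (merged.map (fun p => p.1)) none (some k))

-- ===== PRECONDITION & SPEC =====
-- Pre_ excludes exactly the inputs where the zipped list is empty: there Python A
-- raises ValueError at the 'zip(*...)' unpacking.
def Pre_retrieved_to_candidate_facts (candidate_items : List (String × String × String)) (candidate_indices : List Int) (k : Int) : Prop :=
  candidate_items ≠ [] ∧ candidate_indices ≠ []
instance (candidate_items : List (String × String × String)) (candidate_indices : List Int) (k : Int) : Decidable (Pre_retrieved_to_candidate_facts candidate_items candidate_indices k) := by unfold Pre_retrieved_to_candidate_facts; infer_instance

def pvWitness_retrieved_to_candidate_facts : (List (String × String × String)) × List Int × Int :=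
  ([("a", "b", "c")], ([(0 : Int)], (30 : Int)))

def Spec_retrieved_to_candidate_facts (candidate_items : List (String × String × String)) (candidate_indices : List Int) (k : Int) (out : (List (String × String × String)) × List Int) : Prop := out = retrieved_to_candidate_facts_alt candidate_items candidate_indices k
instance (candidate_items : List (String × String × String)) (candidate_indices : List Int) (k : Int) (out : (List (String × String × String)) × List Int) : Decidable (Spec_retrieved_to_candidate_facts candidate_items candidate_indices k out) := by unfold Spec_retrieved_to_candidate_facts; infer_instance

-- ===== CLAIM (what is proved, stated in full; the proofs are below) =====
def Claim_equal_retrieved_to_candidate_facts : Prop := ∀ (candidate_items : List (String × String × String)) (candidate_indices : List Int) (k : Int), Dom_retrieved_to_candidate_facts candidate_items candidate_indices k → Pre_retrieved_to_candidate_facts candidate_items candidate_indices k → Spec_retrieved_to_candidate_facts candidate_items candidate_indices k (retrieved_to_candidate_facts candidate_items candidate_indices k)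

-- ===== LEMMAS AND PROOFS =====

-- abbreviation for the pair type
abbrev pvP : Type := Int × (String × String × String)

-- the first-occurrence-per-(subject,object) pass that A's dict loop performs
def pvFirstOcc (seen : PySem.Set (String × String)) : List pvP → List pvP
  | [] => []
  | p :: rest =>
    if seen.contains (p.2.1, p.2.2.2) then pvFirstOcc seen rest
    else p :: pvFirstOcc (seen.add (p.2.1, p.2.2.2)) rest

def pvSeenAfter (s : PySem.Set (String × String)) (l : List pvP) : PySem.Set (String × String) :=
  l.foldl (fun s p => PySem.Set.add s (p.2.1, p.2.2.2)) s

lemma pvSet_contains_iff {α : Type} [BEq α] [LawfulBEq α] (s : PySem.Set α) (x : α) :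
    PySem.Set.contains s x = true ↔ x ∈ s := by
  simp [PySem.Set.contains, List.contains_iff_exists_mem_beq]

lemma pvMem_firstOcc {q : pvP} (s : PySem.Set (String × String)) (l : List pvP)
    (h : q ∈ pvFirstOcc s l) : q ∈ l := by
  induction l generalizing s with
  | nil => simpa [pvFirstOcc] using h
  | cons p rest ih =>
    simp only [pvFirstOcc] at h
    split at h
    · exact List.mem_cons_of_mem _ (ih _ h)
    · rcases List.mem_cons.1 h with h | h
      · exact h ▸ List.mem_cons_self
      · exact List.mem_cons_of_mem _ (ih _ h)

lemma pvFirstOcc_append (l1 l2 : List pvP) (s : PySem.Set (String × String)) :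
    pvFirstOcc s (l1 ++ l2) = pvFirstOcc s l1 ++ pvFirstOcc (pvSeenAfter s l1) l2 := by
  induction l1 generalizing s with
  | nil => rfl
  | cons p rest ih =>
    simp only [List.cons_append, pvFirstOcc, pvSeenAfter, List.foldl_cons]
    by_cases hc : PySem.Set.contains s (p.2.1, p.2.2.2) = true
    · rw [if_pos hc, if_pos hc]
      have hadd : PySem.Set.add s (p.2.1, p.2.2.2) = s := by
        unfold PySem.Set.add; rw [if_pos hc]
      rw [ih s]
      simp [pvSeenAfter, hadd]
    · rw [if_neg hc, if_neg hc]
      rw [ih (s.add (p.2.1, p.2.2.2))]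
      simp [pvSeenAfter]

lemma pvMem_seenAfter (l : List pvP) (s : PySem.Set (String × String)) (x : String × String) :
    x ∈ pvSeenAfter s l ↔ x ∈ s ∨ ∃ p ∈ l, (p.2.1, p.2.2.2) = x := by
  induction l generalizing s with
  | nil => simp [pvSeenAfter]
  | cons p rest ih =>
    simp only [pvSeenAfter, List.foldl_cons] at *
    rw [ih (s.add ((p.2.1, p.2.2.2))), PySem.Set.mem_add]
    constructor
    · rintro ((h | h) | ⟨q, hq, hk⟩)
      · exact Or.inl h
      · exact Or.inr ⟨p, List.mem_cons_self, h.symm⟩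
      · exact Or.inr ⟨q, List.mem_cons_of_mem _ hq, hk⟩
    · rintro (h | ⟨q, hq, hk⟩)
      · exact Or.inl (Or.inl h)
      · rcases List.mem_cons.1 hq with rfl | hq
        · exact Or.inl (Or.inr hk.symm)
        · exact Or.inr ⟨q, hq, hk⟩

-- A's dict loop computes exactly the first-occurrence pass
lemma pvDict_foldl_items (l : List pvP)
    (d : PySem.Dict (String × String) pvP) :
    (l.foldl (fun d item =>
        if d.contains (item.2.1, item.2.2.2) = false then d.insert (item.2.1, item.2.2.2) item else d)
      d).items
    = d.items ++ (pvFirstOcc d.keys l).map (fun p => ((p.2.1, p.2.2.2), p)) := by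
  induction l generalizing d with
  | nil => simp [pvFirstOcc]
  | cons p rest ih =>
    simp only [List.foldl_cons, pvFirstOcc]
    have hkeys : PySem.Set.contains d.keys (p.2.1, p.2.2.2) = d.contains (p.2.1, p.2.2.2) := by
      rw [PySem.Dict.contains_eq_decide_mem_keys]
      simp [pvSet_contains_iff]
    by_cases hc : d.contains (p.2.1, p.2.2.2) = true
    · rw [if_neg (by simp [hc]), if_pos (by rw [hkeys]; exact hc)]
      exact ih d
    · have hcf : d.contains (p.2.1, p.2.2.2) = false := by simpa using hc
      rw [if_pos (by simp [hcf]), if_neg (by rw [hkeys, hcf]; simp)]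
      rw [ih (d.insert (p.2.1, p.2.2.2) p)]
      have hins : (d.insert (p.2.1, p.2.2.2) p).items = d.items ++ [((p.2.1, p.2.2.2), p)] := by
        simp [PySem.Dict.insert, hcf]
      have hkeys' : (d.insert (p.2.1, p.2.2.2) p).keys = PySem.Set.add d.keys (p.2.1, p.2.2.2) := by
        have h2 : PySem.Set.add d.keys (p.2.1, p.2.2.2) = d.keys ++ [(p.2.1, p.2.2.2)] := by
          unfold PySem.Set.add; rw [hkeys, hcf]; simp
        rw [h2]; simp [PySem.Dict.keys, hins]
      rw [hins, hkeys']
      simp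

-- ===== generic insertBy-over-blocks lemmas =====

lemma pvInsertBy_append_skip {α : Type} (before : α → α → Bool) (x : α) (l1 l2 : List α)
    (h : ∀ y ∈ l1, before x y = false) :
    PySem.List.insertBy before x (l1 ++ l2) = l1 ++ PySem.List.insertBy before x l2 := by
  induction l1 with
  | nil => rfl
  | cons y ys ih =>
    simp only [List.cons_append, PySem.List.insertBy, h y List.mem_cons_self]
    simp only [Bool.false_eq_true, if_false, List.cons.injEq, true_and]
    exact ih (fun z hz => h z (List.mem_cons_of_mem _ hz))

lemma pvInsertBy_front {α : Type} (before : α → α → Bool) (x : α) (l : List α)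
    (h : ∀ y ∈ l, before x y = true) :
    PySem.List.insertBy before x l = x :: l := by
  cases l with
  | nil => rfl
  | cons y ys => simp [PySem.List.insertBy, h y List.mem_cons_self]

-- inserting a pair into a flatMap of subject blocks lands at the end of its block
lemma pvInsert_flatMap (S : List String) (hS : S.Pairwise (· < ·))
    (F : String → List pvP) (hF : ∀ s, ∀ p ∈ F s, p.2.1 = s)
    (x : pvP) (hFt : x.2.1 ∉ S → F x.2.1 = []) :
    PySem.List.insertBy (fun a b => decide (a.2.1 < b.2.1)) x (S.flatMap F)
      = (if x.2.1 ∈ S then S else PySem.List.insertBy (fun a b => decide (a < b)) x.2.1 S).flatMap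
          (fun s => if s = x.2.1 then F s ++ [x] else F s) := by
  induction S with
  | nil =>
    rw [if_neg List.not_mem_nil]
    simp [PySem.List.insertBy, hFt List.not_mem_nil]
  | cons s0 S' ih =>
    have hlt : ∀ s ∈ S', s0 < s := (List.pairwise_cons.1 hS).1
    rcases lt_trichotomy x.2.1 s0 with hcase | hcase | hcase
    · -- x's subject is below the whole list: prepend
      have hne0 : s0 ≠ x.2.1 := fun h => by rw [h] at hcase; exact lt_irrefl _ hcase
      have htnot : x.2.1 ∉ s0 :: S' := by
        intro hm
        rcases List.mem_cons.1 hm with hm | hm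
        · exact hne0 hm.symm
        · exact absurd hcase (not_lt.2 (le_of_lt (hlt _ hm)))
      have hcongr' : List.flatMap (fun s => if s = x.2.1 then F s ++ [x] else F s) S'
          = List.flatMap F S' := by
        refine List.flatMap_congr ?_
        intro s hs
        show (if s = x.2.1 then F s ++ [x] else F s) = F s
        refine if_neg (fun hst => ?_)
        rw [hst] at hs
        exact htnot (List.mem_cons_of_mem _ hs)
      rw [if_neg htnot]
      rw [pvInsertBy_front _ _ _ (by
        intro y hy
        rcases List.mem_flatMap.1 hy with ⟨s, hs, hys⟩
        rw [hF s y hys, decide_eq_true_iff]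
        rcases List.mem_cons.1 hs with rfl | hs
        · exact hcase
        · exact lt_trans hcase (hlt _ hs))]
      have hins : PySem.List.insertBy (fun a b => decide (a < b)) x.2.1 (s0 :: S')
          = x.2.1 :: s0 :: S' := by
        simp [PySem.List.insertBy, hcase]
      rw [hins]
      simp only [List.flatMap_cons]
      rw [hFt htnot, if_neg hne0, hcongr']
      simp
    · -- same subject as the head block: x lands at the end of that block
      have hmem : x.2.1 ∈ s0 :: S' := by rw [hcase]; exact List.mem_cons_self
      have hcongr' : List.flatMap (fun s => if s = x.2.1 then F s ++ [x] else F s) S'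
          = List.flatMap F S' := by
        refine List.flatMap_congr ?_
        intro s hs
        show (if s = x.2.1 then F s ++ [x] else F s) = F s
        refine if_neg (fun hst => ?_)
        have := hlt s hs
        rw [hst, ← hcase] at this
        exact lt_irrefl _ this
      rw [if_pos hmem]
      simp only [List.flatMap_cons]
      rw [pvInsertBy_append_skip _ _ _ _ (by
        intro y hy
        rw [hF s0 y hy, decide_eq_false_iff_not, hcase]
        exact lt_irrefl _)]
      rw [pvInsertBy_front _ _ _ (by
        intro y hy
        rcases List.mem_flatMap.1 hy with ⟨s, hs, hys⟩
        rw [hF s y hys, decide_eq_true_iff, hcase]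
        exact hlt _ hs)]
      rw [if_pos hcase.symm, hcongr']
      simp
    · -- head block is strictly below: skip it and recurse
      have hne0 : s0 ≠ x.2.1 := fun h => by rw [h] at hcase; exact lt_irrefl _ hcase
      simp only [List.flatMap_cons]
      rw [pvInsertBy_append_skip _ _ _ _ (by
        intro y hy
        rw [hF s0 y hy, decide_eq_false_iff_not]
        exact not_lt.2 (le_of_lt hcase))]
      have hFt' : x.2.1 ∉ S' → F x.2.1 = [] := by
        intro hn
        refine hFt (fun hm => ?_)
        rcases List.mem_cons.1 hm with hm | hm
        · exact hne0 hm.symm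
        · exact hn hm
      rw [ih (List.pairwise_cons.1 hS).2 hFt']
      by_cases hmem : x.2.1 ∈ S'
      · rw [if_pos hmem, if_pos (List.mem_cons_of_mem _ hmem)]
        simp only [List.flatMap_cons]
        rw [if_neg hne0]
      · rw [if_neg hmem, if_neg (by
          intro hm
          rcases List.mem_cons.1 hm with hm | hm
          · exact hne0 hm.symm
          · exact hmem hm)]
        have hins : PySem.List.insertBy (fun a b => decide (a < b)) x.2.1 (s0 :: S')
            = s0 :: PySem.List.insertBy (fun a b => decide (a < b)) x.2.1 S' := by
          simp [PySem.List.insertBy, not_lt.2 (le_of_lt hcase)]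
        rw [hins]
        simp only [List.flatMap_cons]
        rw [if_neg hne0]

-- stable sort by subject = strictly sorted distinct subjects, blocks in original order
lemma pvSorted_eq_flatMap (K : List pvP) :
    PySem.List.sorted K (fun p => p.2.1)
      = (PySem.List.sorted (PySem.List.dedup (K.map (fun p => p.2.1))) (fun s => s)).flatMap
          (fun s => K.filter (fun p => p.2.1 == s)) := by
  induction K using List.reverseRecOn with
  | nil => rfl
  | append_singleton K x ih =>
    have hsortapp :
        PySem.List.sorted (K ++ [x]) (fun p => p.2.1)
          = PySem.List.insertBy (fun a b => decide (a.2.1 < b.2.1)) x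
              (PySem.List.sorted K (fun p => p.2.1)) := by
      rw [PySem.List.sorted_eq_foldl_insertBy, PySem.List.sorted_eq_foldl_insertBy,
          List.foldl_append]
      rfl
    have hsortappS : ∀ (m : List String) (t : String),
        PySem.List.sorted (m ++ [t]) (fun s => s)
          = PySem.List.insertBy (fun a b => decide (a < b)) t
              (PySem.List.sorted m (fun s => s)) := by
      intro m t
      rw [PySem.List.sorted_eq_foldl_insertBy, PySem.List.sorted_eq_foldl_insertBy,
          List.foldl_append]
      rfl
    have hpair : (PySem.List.sorted (PySem.List.dedup (K.map (fun p => p.2.1)))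
        (fun s => s)).Pairwise (· < ·) := by
      rw [PySem.List.dedup_eq_ofList]
      exact PySem.List.sorted_ofList_pairwise_lt _
    have hF : ∀ s, ∀ p ∈ K.filter (fun p : pvP => p.2.1 == s), p.2.1 = s := by
      intro s p hp
      exact eq_of_beq (List.mem_filter.1 hp).2
    have hfun : ∀ s : String, List.filter (fun p : pvP => p.2.1 == s) (K ++ [x])
        = if s = x.2.1 then K.filter (fun p : pvP => p.2.1 == s) ++ [x]
          else K.filter (fun p : pvP => p.2.1 == s) := by
      intro s
      rw [List.filter_append]
      by_cases hst : s = x.2.1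
      · rw [if_pos hst]
        congr 1
        simp [List.filter_cons, hst]
      · rw [if_neg hst]
        have : (x.2.1 == s) = false := by
          simp only [beq_eq_false_iff_ne, ne_eq]
          exact fun h => hst h.symm
        simp [List.filter_cons, this]
    by_cases hmem : x.2.1 ∈ K.map (fun p => p.2.1)
    · have hded : PySem.List.dedup ((K ++ [x]).map (fun p => p.2.1))
          = PySem.List.dedup (K.map (fun p => p.2.1)) := by
        simp only [List.map_append, List.map_cons, List.map_nil]
        rw [PySem.List.dedup_eq_ofList, PySem.List.dedup_eq_ofList,
            PySem.Set.ofList_eq_foldl ((K.map fun p => p.2.1) ++ [x.2.1]), List.foldl_append,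
            List.foldl_cons, List.foldl_nil, ← PySem.Set.ofList_eq_foldl]
        exact PySem.Set.add_of_mem ((PySem.Set.mem_ofList _ _).2 hmem)
      have hmemS : x.2.1 ∈ PySem.List.sorted (PySem.List.dedup (K.map (fun p => p.2.1)))
          (fun s => s) :=
        (PySem.List.mem_sorted _ _ _ _).2 ((PySem.List.mem_dedup _ _).2 hmem)
      rw [hsortapp, ih, hded,
          pvInsert_flatMap _ hpair _ hF x (fun hn => absurd hmemS hn),
          if_pos hmemS]
      refine List.flatMap_congr ?_
      intro s _
      exact (hfun s).symm
    · have hded : PySem.List.dedup ((K ++ [x]).map (fun p => p.2.1))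
          = PySem.List.dedup (K.map (fun p => p.2.1)) ++ [x.2.1] := by
        simp only [List.map_append, List.map_cons, List.map_nil]
        rw [PySem.List.dedup_eq_ofList, PySem.List.dedup_eq_ofList,
            PySem.Set.ofList_eq_foldl ((K.map fun p => p.2.1) ++ [x.2.1]), List.foldl_append,
            List.foldl_cons, List.foldl_nil, ← PySem.Set.ofList_eq_foldl]
        exact PySem.Set.add_of_not_mem (fun hm => hmem ((PySem.Set.mem_ofList _ _).1 hm))
      have hnotS : x.2.1 ∉ PySem.List.sorted (PySem.List.dedup (K.map (fun p => p.2.1)))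
          (fun s => s) :=
        fun h => hmem ((PySem.List.mem_dedup _ _).1 ((PySem.List.mem_sorted _ _ _ _).1 h))
      have hFt : K.filter (fun p : pvP => p.2.1 == x.2.1) = [] := by
        rw [List.filter_eq_nil_iff]
        intro p hp hbeq
        exact hmem (List.mem_map.2 ⟨p, hp, eq_of_beq hbeq⟩)
      rw [hsortapp, ih, hded, hsortappS,
          pvInsert_flatMap _ hpair _ hF x (fun _ => hFt),
          if_neg hnotS]
      refine List.flatMap_congr ?_
      intro s _
      exact (hfun s).symm

-- every subject of the input survives the first-occurrence pass
lemma pvSubj_firstOcc (l : List pvP) (seen : PySem.Set (String × String)) (s : String)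
    (h : s ∈ l.map (fun p => p.2.1)) :
    s ∈ (pvFirstOcc seen l).map (fun p => p.2.1) ∨ ∃ o, (s, o) ∈ seen := by
  induction l generalizing seen with
  | nil => simp at h
  | cons p rest ih =>
    rw [List.map_cons] at h
    simp only [pvFirstOcc]
    rcases List.mem_cons.1 h with hsp | hs
    · by_cases hc : PySem.Set.contains seen (p.2.1, p.2.2.2) = true
      · rw [if_pos hc]
        exact Or.inr ⟨p.2.2.2, by rw [hsp]; exact (pvSet_contains_iff _ _).1 hc⟩
      · rw [if_neg hc]
        exact Or.inl (by rw [List.map_cons, hsp]; exact List.mem_cons_self)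
    · by_cases hc : PySem.Set.contains seen (p.2.1, p.2.2.2) = true
      · rw [if_pos hc]
        exact ih seen hs
      · rw [if_neg hc]
        rcases ih (seen.add (p.2.1, p.2.2.2)) hs with hin | ⟨o, ho⟩
        · exact Or.inl (by rw [List.map_cons]; exact List.mem_cons_of_mem _ hin)
        · rcases (PySem.Set.mem_add _ _ _).1 ho with ho | ho
          · exact Or.inr ⟨o, ho⟩
          · exact Or.inl (by
              have hs1 : s = p.2.1 := congrArg Prod.fst ho
              rw [List.map_cons, hs1]
              exact List.mem_cons_self)

-- ===== B-side invariant =====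

-- B's grouping fold, named for the lemmas
def pvGroups (l : List pvP) : PySem.Dict String (List pvP × PySem.Set String) :=
  l.foldl
    (fun d pair =>
      let g := d.getD pair.2.1 ([], (PySem.Set.empty : PySem.Set String))
      if g.2.contains pair.2.2.2 then d
      else d.insert pair.2.1 (g.1 ++ [pair], g.2.add pair.2.2.2))
    PySem.Dict.empty

lemma pvGroups_items (l : List pvP) :
    (pvGroups l).items
      = (PySem.List.dedup (l.map (fun p => p.2.1))).map
          (fun s => (s, ((pvFirstOcc PySem.Set.empty l).filter (fun p => p.2.1 == s),
                         PySem.Set.ofList ((l.filter (fun p => p.2.1 == s)).map (fun p => p.2.2.2))))) := by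
  induction l using List.reverseRecOn with
  | nil => rfl
  | append_singleton l x ih =>
    have hstep : pvGroups (l ++ [x])
        = (if ((pvGroups l).getD x.2.1 ([], (PySem.Set.empty : PySem.Set String))).2.contains x.2.2.2
           then pvGroups l
           else (pvGroups l).insert x.2.1
             ((((pvGroups l).getD x.2.1 ([], PySem.Set.empty)).1 ++ [x]),
              (((pvGroups l).getD x.2.1 ([], PySem.Set.empty)).2.add x.2.2.2))) := by
      unfold pvGroups
      rw [List.foldl_append, List.foldl_cons, List.foldl_nil]
    have hofapp : ∀ {β : Type} [BEq β] (m : List β) (a : β),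
        PySem.Set.ofList (m ++ [a]) = PySem.Set.add (PySem.Set.ofList m) a := by
      intro β _ m a
      rw [PySem.Set.ofList_eq_foldl, List.foldl_append, List.foldl_cons, List.foldl_nil,
          ← PySem.Set.ofList_eq_foldl]
    have hnodD : (PySem.List.dedup (l.map (fun p : pvP => p.2.1))).Nodup := by
      rw [PySem.List.dedup_eq_ofList]
      exact PySem.Set.nodup_ofList _
    have hkeys : (pvGroups l).keys = PySem.List.dedup (l.map (fun p : pvP => p.2.1)) := by
      simp only [PySem.Dict.keys, ih, List.map_map]
      exact (List.map_congr_left (fun s _ => rfl)).trans (List.map_id _)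
    have hnodk : (pvGroups l).keys.Nodup := by rw [hkeys]; exact hnodD
    by_cases hts : x.2.1 ∈ l.map (fun p : pvP => p.2.1)
    · -- subject already present
      have htD : x.2.1 ∈ PySem.List.dedup (l.map (fun p : pvP => p.2.1)) :=
        (PySem.List.mem_dedup _ _).2 hts
      have hmemItems :
          (x.2.1, ((pvFirstOcc PySem.Set.empty l).filter (fun p : pvP => p.2.1 == x.2.1),
            PySem.Set.ofList ((l.filter (fun p : pvP => p.2.1 == x.2.1)).map (fun p => p.2.2.2))))
            ∈ (pvGroups l).items := by
        rw [ih]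
        exact List.mem_map.2 ⟨x.2.1, htD, rfl⟩
      have hgetD : (pvGroups l).getD x.2.1 ([], (PySem.Set.empty : PySem.Set String))
          = ((pvFirstOcc PySem.Set.empty l).filter (fun p : pvP => p.2.1 == x.2.1),
             PySem.Set.ofList ((l.filter (fun p : pvP => p.2.1 == x.2.1)).map (fun p => p.2.2.2))) :=
        PySem.Dict.getD_of_mem_items _ hmemItems hnodk _
      have hdednew : PySem.List.dedup ((l ++ [x]).map (fun p : pvP => p.2.1))
          = PySem.List.dedup (l.map (fun p : pvP => p.2.1)) := by
        simp only [List.map_append, List.map_cons, List.map_nil]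
        rw [PySem.List.dedup_eq_ofList, hofapp, ← PySem.List.dedup_eq_ofList]
        exact PySem.Set.add_of_mem htD
      have hcont : (pvGroups l).contains x.2.1 = true :=
        (PySem.Dict.contains_iff_mem_keys _ _).2 (by rw [hkeys]; exact htD)
      by_cases hdup :
          (PySem.Set.ofList ((l.filter (fun p : pvP => p.2.1 == x.2.1)).map
            (fun p => p.2.2.2))).contains x.2.2.2 = true
      · -- duplicate (subject, object): everything unchanged and x dropped
        have hdup' : ∃ p, p ∈ l ∧ p.2.1 = x.2.1 ∧ p.2.2.2 = x.2.2.2 := by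
          rcases List.mem_map.1 ((PySem.Set.mem_ofList _ _).1
            ((pvSet_contains_iff _ _).1 hdup)) with ⟨p, hpf, hpo⟩
          rcases List.mem_filter.1 hpf with ⟨hpl, hpb⟩
          exact ⟨p, hpl, eq_of_beq hpb, hpo⟩
        have hKnew : pvFirstOcc PySem.Set.empty (l ++ [x]) = pvFirstOcc PySem.Set.empty l := by
          rw [pvFirstOcc_append]
          have hseen : (x.2.1, x.2.2.2) ∈ pvSeenAfter PySem.Set.empty l := by
            rw [pvMem_seenAfter]
            right
            obtain ⟨p, hp, hp1, hp2⟩ := hdup'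
            exact ⟨p, hp, by rw [hp1, hp2]⟩
          have hsing : pvFirstOcc (pvSeenAfter PySem.Set.empty l) [x] = [] := by
            simp only [pvFirstOcc]
            rw [if_pos ((pvSet_contains_iff _ _).2 hseen)]
          rw [hsing, List.append_nil]
        rw [hstep, hgetD, if_pos hdup, ih, hdednew]
        refine List.map_congr_left ?_
        intro s hsD
        show (s, _) = (s, _)
        refine congrArg _ (Prod.ext ?_ ?_)
        · show (pvFirstOcc PySem.Set.empty l).filter (fun p : pvP => p.2.1 == s)
            = (pvFirstOcc PySem.Set.empty (l ++ [x])).filter (fun p : pvP => p.2.1 == s)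
          rw [hKnew]
        · show PySem.Set.ofList ((l.filter (fun p : pvP => p.2.1 == s)).map (fun p => p.2.2.2))
            = PySem.Set.ofList (((l ++ [x]).filter (fun p : pvP => p.2.1 == s)).map (fun p => p.2.2.2))
          rw [List.filter_append]
          by_cases hseq : (x.2.1 == s) = true
          · have hxf : List.filter (fun p : pvP => p.2.1 == s) [x] = [x] := by
              simp [List.filter_cons, hseq]
            rw [hxf, List.map_append, List.map_cons, List.map_nil, hofapp]
            refine (PySem.Set.add_of_mem ?_).symm
            obtain ⟨p, hp, hp1, hp2⟩ := hdup'
            refine (PySem.Set.mem_ofList _ _).2 (List.mem_map.2 ⟨p, ?_, hp2⟩)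
            exact List.mem_filter.2 ⟨hp, by rw [hp1]; exact hseq⟩
          · have hxf : List.filter (fun p : pvP => p.2.1 == s) [x] = [] := by
              simp only [List.filter_cons, List.filter_nil, hseq]
              simp [Bool.eq_false_iff.2 (fun h => hseq h)]
            rw [hxf, List.append_nil]
      · -- fresh object in an existing bucket: append to that bucket
        have hnoseen : (x.2.1, x.2.2.2) ∉ pvSeenAfter PySem.Set.empty l := by
          rw [pvMem_seenAfter]
          rintro (h | ⟨p, hp, hpk⟩)
          · exact List.not_mem_nil h
          · refine absurd ((pvSet_contains_iff _ _).2 ?_) hdup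
            have hp2 : p.2.2.2 = x.2.2.2 := (Prod.ext_iff.1 hpk).2
            have hp1 : p.2.1 = x.2.1 := (Prod.ext_iff.1 hpk).1
            refine (PySem.Set.mem_ofList _ _).2 (List.mem_map.2 ⟨p, ?_, hp2⟩)
            exact List.mem_filter.2 ⟨hp, beq_iff_eq.2 hp1⟩
        have hKnew : pvFirstOcc PySem.Set.empty (l ++ [x])
            = pvFirstOcc PySem.Set.empty l ++ [x] := by
          rw [pvFirstOcc_append]
          have hc : PySem.Set.contains (pvSeenAfter PySem.Set.empty l) (x.2.1, x.2.2.2) = false := by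
            cases hb : PySem.Set.contains (pvSeenAfter PySem.Set.empty l) (x.2.1, x.2.2.2)
            · rfl
            · exact absurd ((pvSet_contains_iff _ _).1 hb) hnoseen
          have hsing : pvFirstOcc (pvSeenAfter PySem.Set.empty l) [x] = [x] := by
            simp only [pvFirstOcc]
            rw [if_neg (by rw [hc]; exact Bool.false_ne_true)]
          rw [hsing]
        rw [hstep, hgetD, if_neg hdup]
        rw [PySem.Dict.items_insert_of_contains _ _ hcont, ih, List.map_map, hdednew]
        refine List.map_congr_left ?_
        intro s hsD
        show (if (s == x.2.1) = true then _ else _) = _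
        by_cases hseq : (s == x.2.1) = true
        · rw [if_pos hseq, eq_of_beq hseq]
          refine (congrArg (fun q => (x.2.1, q)) (Prod.ext ?_ ?_)).symm
          · show (pvFirstOcc PySem.Set.empty (l ++ [x])).filter (fun p : pvP => p.2.1 == x.2.1)
              = (pvFirstOcc PySem.Set.empty l).filter (fun p : pvP => p.2.1 == x.2.1) ++ [x]
            rw [hKnew, List.filter_append]
            congr 1
            simp [List.filter_cons]
          · show PySem.Set.ofList (((l ++ [x]).filter (fun p : pvP => p.2.1 == x.2.1)).map (fun p => p.2.2.2))
              = PySem.Set.add (PySem.Set.ofList ((l.filter (fun p : pvP => p.2.1 == x.2.1)).map (fun p => p.2.2.2))) x.2.2.2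
            rw [List.filter_append]
            have hxf : List.filter (fun p : pvP => p.2.1 == x.2.1) [x] = [x] := by
              simp [List.filter_cons]
            rw [hxf, List.map_append, List.map_cons, List.map_nil, hofapp]
        · rw [if_neg hseq]
          have hne : (x.2.1 == s) = false :=
            Bool.eq_false_iff.2 (fun h => hseq (beq_iff_eq.2 (eq_of_beq h).symm))
          refine congrArg _ (Prod.ext ?_ ?_)
          · show (pvFirstOcc PySem.Set.empty l).filter (fun p : pvP => p.2.1 == s)
              = (pvFirstOcc PySem.Set.empty (l ++ [x])).filter (fun p : pvP => p.2.1 == s)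
            rw [hKnew, List.filter_append]
            have hxf : List.filter (fun p : pvP => p.2.1 == s) [x] = [] := by
              simp only [List.filter_cons, List.filter_nil, hne]
              simp
            rw [hxf, List.append_nil]
          · show PySem.Set.ofList ((l.filter (fun p : pvP => p.2.1 == s)).map (fun p => p.2.2.2))
              = PySem.Set.ofList (((l ++ [x]).filter (fun p : pvP => p.2.1 == s)).map (fun p => p.2.2.2))
            rw [List.filter_append]
            have hxf : List.filter (fun p : pvP => p.2.1 == s) [x] = [] := by
              simp only [List.filter_cons, List.filter_nil, hne]
              simp
            rw [hxf, List.append_nil]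
    · -- fresh subject: a new bucket is appended
      have htD : x.2.1 ∉ PySem.List.dedup (l.map (fun p : pvP => p.2.1)) :=
        fun h => hts ((PySem.List.mem_dedup _ _).1 h)
      have hcont : (pvGroups l).contains x.2.1 = false := by
        cases hb : (pvGroups l).contains x.2.1
        · rfl
        · refine absurd ((PySem.Dict.contains_iff_mem_keys _ _).1 hb) ?_
          rw [hkeys]
          exact htD
      have hgetD : (pvGroups l).getD x.2.1 ([], (PySem.Set.empty : PySem.Set String))
          = ([], PySem.Set.empty) := PySem.Dict.getD_of_not_contains _ _ hcont
      have hdednew : PySem.List.dedup ((l ++ [x]).map (fun p : pvP => p.2.1))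
          = PySem.List.dedup (l.map (fun p : pvP => p.2.1)) ++ [x.2.1] := by
        simp only [List.map_append, List.map_cons, List.map_nil]
        rw [PySem.List.dedup_eq_ofList, hofapp, ← PySem.List.dedup_eq_ofList]
        exact PySem.Set.add_of_not_mem htD
      have hnoseen : (x.2.1, x.2.2.2) ∉ pvSeenAfter PySem.Set.empty l := by
        rw [pvMem_seenAfter]
        rintro (h | ⟨p, hp, hpk⟩)
        · exact List.not_mem_nil h
        · refine hts (List.mem_map.2 ⟨p, hp, ?_⟩)
          exact (Prod.ext_iff.1 hpk).1
      have hKnew : pvFirstOcc PySem.Set.empty (l ++ [x])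
          = pvFirstOcc PySem.Set.empty l ++ [x] := by
        rw [pvFirstOcc_append]
        have hc : PySem.Set.contains (pvSeenAfter PySem.Set.empty l) (x.2.1, x.2.2.2) = false := by
          cases hb : PySem.Set.contains (pvSeenAfter PySem.Set.empty l) (x.2.1, x.2.2.2)
          · rfl
          · exact absurd ((pvSet_contains_iff _ _).1 hb) hnoseen
        have hsing : pvFirstOcc (pvSeenAfter PySem.Set.empty l) [x] = [x] := by
          simp only [pvFirstOcc]
          rw [if_neg (by rw [hc]; exact Bool.false_ne_true)]
        rw [hsing]
      rw [hstep, hgetD]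
      rw [if_neg (by exact fun h => Bool.false_ne_true h)]
      rw [PySem.Dict.items_insert_of_not_contains _ _ hcont, ih, hdednew, List.map_append]
      congr 1
      · refine List.map_congr_left ?_
        intro s hsD
        have hne : (x.2.1 == s) = false := by
          refine Bool.eq_false_iff.2 (fun h => ?_)
          rw [eq_of_beq h] at hts
          exact hts (((PySem.List.mem_dedup _ _)).1 hsD)
        refine congrArg _ (Prod.ext ?_ ?_)
        · show (pvFirstOcc PySem.Set.empty l).filter (fun p : pvP => p.2.1 == s)
            = (pvFirstOcc PySem.Set.empty (l ++ [x])).filter (fun p : pvP => p.2.1 == s)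
          rw [hKnew, List.filter_append]
          have hxf : List.filter (fun p : pvP => p.2.1 == s) [x] = [] := by
            simp only [List.filter_cons, List.filter_nil, hne]
            simp
          rw [hxf, List.append_nil]
        · show PySem.Set.ofList ((l.filter (fun p : pvP => p.2.1 == s)).map (fun p => p.2.2.2))
            = PySem.Set.ofList (((l ++ [x]).filter (fun p : pvP => p.2.1 == s)).map (fun p => p.2.2.2))
          rw [List.filter_append]
          have hxf : List.filter (fun p : pvP => p.2.1 == s) [x] = [] := by
            simp only [List.filter_cons, List.filter_nil, hne]
            simp
          rw [hxf, List.append_nil]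
      · -- the new singleton bucket
        have hKfilter : (pvFirstOcc PySem.Set.empty l).filter (fun p : pvP => p.2.1 == x.2.1)
            = [] := by
          rw [List.filter_eq_nil_iff]
          intro p hp hb
          exact hts (List.mem_map.2 ⟨p, pvMem_firstOcc _ _ hp, eq_of_beq hb⟩)
        have hlfilter : l.filter (fun p : pvP => p.2.1 == x.2.1) = [] := by
          rw [List.filter_eq_nil_iff]
          intro p hp hb
          exact hts (List.mem_map.2 ⟨p, hp, eq_of_beq hb⟩)
        rw [List.map_cons, List.map_nil]
        refine congrArg (fun q => [(x.2.1, q)]) (Prod.ext ?_ ?_)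
        · show ([] : List pvP) ++ [x]
            = (pvFirstOcc PySem.Set.empty (l ++ [x])).filter (fun p : pvP => p.2.1 == x.2.1)
          rw [hKnew, List.filter_append, hKfilter]
          congr 1
          simp [List.filter_cons]
        · show PySem.Set.add PySem.Set.empty x.2.2.2
            = PySem.Set.ofList (((l ++ [x]).filter (fun p : pvP => p.2.1 == x.2.1)).map (fun p => p.2.2.2))
          rw [List.filter_append, hlfilter, List.nil_append]
          have hxf : List.filter (fun p : pvP => p.2.1 == x.2.1) [x] = [x] := by
            simp [List.filter_cons]
          rw [hxf, List.map_cons, List.map_nil]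
          rfl

lemma pvMerged_eq (l : List pvP) :
    (PySem.List.sorted (pvGroups l).keys (fun s => s)).foldl
        (fun acc subj => acc ++ ((pvGroups l).getD subj ([], PySem.Set.empty)).1) []
      = PySem.List.sorted (pvFirstOcc PySem.Set.empty l) (fun p => p.2.1) := by
  have hnodD : (PySem.List.dedup (l.map (fun p : pvP => p.2.1))).Nodup := by
    rw [PySem.List.dedup_eq_ofList]
    exact PySem.Set.nodup_ofList _
  have hkeys : (pvGroups l).keys = PySem.List.dedup (l.map (fun p : pvP => p.2.1)) := by
    simp only [PySem.Dict.keys, pvGroups_items, List.map_map]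
    exact (List.map_congr_left (fun s _ => rfl)).trans (List.map_id _)
  have hnodk : (pvGroups l).keys.Nodup := by rw [hkeys]; exact hnodD
  have hget : ∀ s ∈ PySem.List.sorted (pvGroups l).keys (fun s => s),
      ((pvGroups l).getD s ([], PySem.Set.empty)).1
        = (pvFirstOcc PySem.Set.empty l).filter (fun p : pvP => p.2.1 == s) := by
    intro s hs
    have hsD : s ∈ PySem.List.dedup (l.map (fun p : pvP => p.2.1)) := by
      rw [← hkeys]
      exact (PySem.List.mem_sorted _ _ _ _).1 hs
    have hmi : (s, ((pvFirstOcc PySem.Set.empty l).filter (fun p : pvP => p.2.1 == s),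
        PySem.Set.ofList ((l.filter (fun p : pvP => p.2.1 == s)).map (fun p => p.2.2.2))))
        ∈ (pvGroups l).items := by
      rw [pvGroups_items]
      exact List.mem_map.2 ⟨s, hsD, rfl⟩
    rw [PySem.Dict.getD_of_mem_items _ hmi hnodk]
  rw [PySem.List.foldl_append_eq_flatMap, List.nil_append]
  have h1 : List.flatMap (fun subj => ((pvGroups l).getD subj ([], PySem.Set.empty)).1)
      (PySem.List.sorted (pvGroups l).keys (fun s => s))
      = List.flatMap (fun s => (pvFirstOcc PySem.Set.empty l).filter (fun p : pvP => p.2.1 == s))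
        (PySem.List.sorted (pvGroups l).keys (fun s => s)) :=
    List.flatMap_congr hget
  have hperm : (PySem.List.dedup (l.map (fun p : pvP => p.2.1))).Perm
      (PySem.List.dedup ((pvFirstOcc PySem.Set.empty l).map (fun p : pvP => p.2.1))) := by
    refine (List.perm_ext_iff_of_nodup hnodD ?_).2 ?_
    · rw [PySem.List.dedup_eq_ofList]
      exact PySem.Set.nodup_ofList _
    · intro s
      rw [PySem.List.mem_dedup, PySem.List.mem_dedup]
      constructor
      · intro hs
        rcases pvSubj_firstOcc l PySem.Set.empty s hs with h | ⟨o, ho⟩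
        · exact h
        · exact absurd ho List.not_mem_nil
      · intro hs
        rcases List.mem_map.1 hs with ⟨p, hp, rfl⟩
        exact List.mem_map.2 ⟨p, pvMem_firstOcc _ _ hp, rfl⟩
  have hsorteq := PySem.List.sorted_eq_sorted_of_perm _ _ (fun s => s)
    (fun a b h => h) hperm
  rw [h1, hkeys, hsorteq, ← pvSorted_eq_flatMap]

lemma pvPorts_eq (candidate_items : List (String × String × String))
    (candidate_indices : List Int) (k : Int) :
    retrieved_to_candidate_facts candidate_items candidate_indices k
      = retrieved_to_candidate_facts_alt candidate_items candidate_indices k := by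
  unfold retrieved_to_candidate_facts retrieved_to_candidate_facts_alt
  have hvals :
      (((List.zip candidate_indices candidate_items).foldl
          (fun d item =>
            if d.contains (item.2.1, item.2.2.2) = false then d.insert (item.2.1, item.2.2.2) item else d)
          (PySem.Dict.empty : PySem.Dict (String × String) pvP)).values)
        = pvFirstOcc PySem.Set.empty (List.zip candidate_indices candidate_items) := by
    rw [PySem.Dict.values, pvDict_foldl_items]
    simp [PySem.Dict.empty, PySem.Dict.keys, PySem.Set.empty, Function.comp_def]
  have hG : ((List.zip candidate_indices candidate_items).foldl
      (fun d pair =>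
        let g := d.getD pair.2.1 ([], (PySem.Set.empty : PySem.Set String))
        if g.2.contains pair.2.2.2 then d
        else d.insert pair.2.1 (g.1 ++ [pair], g.2.add pair.2.2.2))
      (PySem.Dict.empty : PySem.Dict String (List (Int × (String × String × String)) × PySem.Set String)))
      = pvGroups (List.zip candidate_indices candidate_items) := rfl
  simp only [hvals, hG, pvMerged_eq]

-- ===== VERDICT (by name: the statement is the Claim_ definition above) =====
theorem retrieved_to_candidate_facts_spec : Claim_equal_retrieved_to_candidate_facts := by
  intro candidate_items candidate_indices k _ _
  exact pvPorts_eq candidate_items candidate_indices k
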